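-- pv_equiv track=rewrite | github.com/skku-algostudy/algostudy-python | week2/민경/programmers-징검다리 건너기/solution.py | solution
-- ===== SOURCE A (Python) =====
-- def solution(stones, k):
--     def possible(std):
--         jump = 1
--         for stone in stones:
--             if stone < std:
--                 jump += 1
--             else:
--                 jump = 1
--             if jump > k:    # 이게 맨 앞으로 가면 맨 뒤에서 문제가 생기는 경우를 잡지 못하니까
--                 return False
--         return True
--
--     def binary_search(start, end):
--         mid = (start + end) // 2
--         pos_std = possible(mid)
--         if pos_std and not possible(mid+1):
--             return mid
--         elif pos_std:
--             return binary_search(mid+1, end)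
--         else:
--             return binary_search(start, mid-1)
--     if len(stones) == 1:
--         return stones[0]
--     return binary_search(0, max(stones))
-- ===== SOURCE B (Python) =====
-- def solution(stones, k):
--     # Block decomposition with block size k: pre[i] = max of stones from the
--     # start of i's block through i; suf[i] = max from i through the end of
--     # i's block (clipped at n-1). Every k-window is the union of a block
--     # suffix and the following block prefix, so its maximum is
--     # max(suf[i], pre[i+k-1]).  O(n) total.
--     n = len(stones)
--     pre = []
--     for i in range(n):
--         pre.append(stones[i] if i % k == 0 else max(pre[i - 1], stones[i]))
--     suf = [0] * n
--     for i in range(n - 1, -1, -1):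
--         suf[i] = stones[i] if i % k == k - 1 or i == n - 1 else max(suf[i + 1], stones[i])
--     return min(max(suf[i], pre[i + k - 1]) for i in range(n - k + 1))
-- ===== Notes on version B (the rewrite author's own statement) =====
-- stated objective: faster
-- what changed: Replaced the binary search over thresholds (each probe rescanning all stones for a run of k low stones) with a direct O(n) computation: the answer is the minimum over all k-windows of the window maximum, each window maximum obtained from precomputed block-suffix and block-prefix maxima (block size k).
-- outside the precondition, e.g. on solution([5], 2): A returns 5, B raises ValueError; on solution([-1, -1], 1): A returns -1, B returns -1
import Mathlib
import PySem

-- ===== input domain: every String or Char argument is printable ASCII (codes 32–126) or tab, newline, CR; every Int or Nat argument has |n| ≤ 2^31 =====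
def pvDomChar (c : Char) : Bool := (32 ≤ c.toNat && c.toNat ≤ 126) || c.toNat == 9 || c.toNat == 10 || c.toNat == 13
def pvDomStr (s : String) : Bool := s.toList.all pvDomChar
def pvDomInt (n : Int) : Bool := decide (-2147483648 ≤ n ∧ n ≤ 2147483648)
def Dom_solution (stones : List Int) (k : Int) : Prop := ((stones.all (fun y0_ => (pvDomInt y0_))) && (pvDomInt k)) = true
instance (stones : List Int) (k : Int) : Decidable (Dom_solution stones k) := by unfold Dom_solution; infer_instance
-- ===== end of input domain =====

-- B replaces A's binary search over thresholds (each probe rescanning the stones) with an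
-- O(n) block decomposition: the answer is the minimum over all k-windows of the window
-- maximum, and each window maximum is max(block-suffix max, block-prefix max).
-- A's binary_search recurses forever on some inputs; those are excluded by Pre_solution below.

-- ===== PORT A =====
-- inner 'possible(std)': jump counter over the stones, early return False
def possGo (std k : Int) : List Int → Int → Bool
  | [], _ => true
  | s :: rest, jump =>
    let j := if s < std then jump + 1 else 1
    if j > k then false else possGo std k rest j

def possibleA (stones : List Int) (k std : Int) : Bool := possGo std k stones 1

-- inner 'binary_search(start, end)'; fuel only makes the (possibly non-terminating)
-- Python recursion total — under Pre_solution the fuel given below is never exhausted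
def bsGo (stones : List Int) (k : Int) : Nat → Int → Int → Int
  | 0, _, _ => 0
  | fuel+1, start, en =>
    let mid := PySem.Int.floordiv (start + en) 2
    if possibleA stones k mid && !(possibleA stones k (mid+1)) then mid
    else if possibleA stones k mid then bsGo stones k fuel (mid+1) en
    else bsGo stones k fuel start (mid-1)

def solution (stones : List Int) (k : Int) : Int :=
  if stones.length = 1 then (PySem.List.pyGet? stones 0).getD 0  -- stones[0]; in range since length = 1
  else
    let mx := (PySem.List.max? stones (fun x => x)).getD 0  -- max(stones); exact under Pre_ (stones ≠ [])
    bsGo stones k (mx.toNat + 2) 0 mx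

-- ===== PORT B =====
-- first loop: pre.append(stones[i] if i % k == 0 else max(pre[i-1], stones[i]))
-- (pre[i-1] is the element appended on the previous iteration, carried as `prev`)
def goPre (k : Int) : List Int → Nat → Int → List Int
  | [], _, _ => []
  | s :: rest, i, prev =>
    let v := if PySem.Int.mod (i : Int) k = 0 then s else max prev s
    v :: goPre k rest (i + 1) v

-- second loop, i from n-1 down to 0: suf[i] = stones[i] if i % k == k - 1 or i == n - 1
-- else max(suf[i+1], stones[i]); written as right-recursion, suf[i+1] is the head of `tail`
def goSuf (k : Int) (n : Nat) : List Int → Nat → List Int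
  | [], _ => []
  | s :: rest, i =>
    let tail := goSuf k n rest (i + 1)
    (if PySem.Int.mod (i : Int) k = k - 1 ∨ i = n - 1 then s else max (tail.headD 0) s) :: tail

def solution_alt (stones : List Int) (k : Int) : Int :=
  let n : Int := stones.length
  let pre := goPre k stones 0 0
  let suf := goSuf k stones.length stones 0
  let mins := (PySem.List.pyRange 0 (n - k + 1) 1).map
      (fun i => max ((PySem.List.pyGet? suf i).getD 0) ((PySem.List.pyGet? pre (i + k - 1)).getD 0))
  (PySem.List.min? mins (fun x => x)).getD 0  -- min(...); exact under Pre_ (mins ≠ [])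

-- ===== PRECONDITION & SPEC =====
-- Pre_ excludes the inputs where A's recursion never returns (k < 1, k > len(stones) with
-- several stones, or some k-window entirely negative, since binary_search over [0, max]
-- never probes below -1); the same window condition also carves out two boundary families
-- where A does return: the len==1 shortcut with k ≠ 1, and inputs whose answer is exactly -1.
def Pre_solution (stones : List Int) (k : Int) : Prop :=
  1 ≤ k ∧ k ≤ stones.length ∧
    (stones.length = 1 ∨
      ∀ i < stones.length + 1 - k.toNat, ∃ j < k.toNat, 0 ≤ stones.getD (i + j) 0)
instance (stones : List Int) (k : Int) : Decidable (Pre_solution stones k) := by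
  unfold Pre_solution; infer_instance

def pvWitness_solution : List Int × Int := ([3, 1, 4, -2, 5], 2)

def Spec_solution (stones : List Int) (k : Int) (out : Int) : Prop := out = solution_alt stones k
instance (stones : List Int) (k : Int) (out : Int) : Decidable (Spec_solution stones k out) := by unfold Spec_solution; infer_instance

-- ===== CLAIM (what is proved, stated in full; the proofs are below) =====
def Claim_equal_solution : Prop := ∀ (stones : List Int) (k : Int), Dom_solution stones k → Pre_solution stones k → Spec_solution stones k (solution stones k)

-- ===== LEMMAS AND PROOFS =====

-- "some prefix run of low stones, counted on top of an incoming jump of j, overflows k"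
def BadPre (std k : Int) (l : List Int) (j : Int) : Prop :=
  ∃ m : Nat, m ≤ l.length ∧ (∀ t, t < m → l.getD t 0 < std) ∧ k < j + m

-- "some window of kn consecutive stones is entirely below std"
def BadRun (std : Int) (kn : Nat) (l : List Int) : Prop :=
  ∃ i : Nat, i + kn ≤ l.length ∧ ∀ t, t < kn → l.getD (i + t) 0 < std

theorem possGo_iff (std k : Int) (hk : 1 ≤ k) :
    ∀ (l : List Int) (j : Int), 1 ≤ j → j ≤ k →
      (possGo std k l j = true ↔ ¬ (BadPre std k l j ∨ BadRun std k.toNat l)) := by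
  intro l
  induction l with
  | nil =>
    intro j hj1 hjk
    simp only [possGo, true_iff]
    rintro (⟨m, hm, _, hkj⟩ | ⟨i, hi, _⟩)
    · simp only [List.length_nil, Nat.le_zero] at hm
      omega
    · simp only [List.length_nil] at hi
      omega
  | cons s rest ih =>
    intro j hj1 hjk
    by_cases hs : s < std
    · by_cases hjump : j + 1 > k
      · have hfalse : possGo std k (s :: rest) j = false := by
          simp [possGo, hs, hjump]
        rw [hfalse]
        simp only [Bool.false_eq_true, false_iff, not_not]
        left
        refine ⟨1, by simp, ?_, ?_⟩
        · intro t ht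
          interval_cases t
          rw [List.getD_cons_zero]
          exact hs
        · push_cast
          omega
      · have hrec : possGo std k (s :: rest) j = possGo std k rest (j + 1) := by
          simp [possGo, hs, hjump]
        rw [hrec, ih (j + 1) (by omega) (by omega)]
        apply not_congr
        constructor
        -- rest-side (jump j+1) → cons-side (jump j)
        · rintro (⟨m, hm, hlow, hkj⟩ | ⟨i, hi, hlow⟩)
          · left
            refine ⟨m + 1, ?_, ?_, ?_⟩
            · simp only [List.length_cons]; omega
            · intro t ht
              match t with
              | 0 => rw [List.getD_cons_zero]; exact hs
              | t + 1 => rw [List.getD_cons_succ]; exact hlow t (by omega)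
            · omega
          · right
            refine ⟨i + 1, ?_, ?_⟩
            · simp only [List.length_cons]; omega
            · intro t ht
              have heq : i + 1 + t = (i + t) + 1 := by omega
              rw [heq, List.getD_cons_succ]
              exact hlow t ht
        -- cons-side (jump j) → rest-side (jump j+1)
        · rintro (⟨m, hm, hlow, hkj⟩ | ⟨i, hi, hlow⟩)
          · have hm1 : 1 ≤ m := by omega
            left
            refine ⟨m - 1, ?_, ?_, ?_⟩
            · simp only [List.length_cons] at hm; omega
            · intro t ht
              have h2 := hlow (t + 1) (by omega)
              rwa [List.getD_cons_succ] at h2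
            · omega
          · rcases Nat.eq_zero_or_pos i with rfl | hipos
            · left
              refine ⟨k.toNat - 1, ?_, ?_, ?_⟩
              · simp only [List.length_cons] at hi; omega
              · intro t ht
                have h2 := hlow (t + 1) (by omega)
                rwa [Nat.zero_add, List.getD_cons_succ] at h2
              · omega
            · right
              refine ⟨i - 1, ?_, ?_⟩
              · simp only [List.length_cons] at hi; omega
              · intro t ht
                have h2 := hlow t ht
                have heq : i + t = (i - 1 + t) + 1 := by omega
                rwa [heq, List.getD_cons_succ] at h2
    · have hrec : possGo std k (s :: rest) j = possGo std k rest 1 := by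
        simp only [possGo, if_neg hs]
        rw [if_neg (by omega)]
      rw [hrec, ih 1 le_rfl hk]
      apply not_congr
      constructor
      -- rest-side (jump 1) → cons-side (jump j)
      · rintro (⟨m, hm, hlow, hkj⟩ | ⟨i, hi, hlow⟩)
        · -- a prefix run of rest overflowing from jump 1 is a k-window of rest, at i = 1 in s :: rest
          right
          refine ⟨1, ?_, ?_⟩
          · simp only [List.length_cons]; omega
          · intro t ht
            have heq : 1 + t = t + 1 := by omega
            rw [heq, List.getD_cons_succ]
            exact hlow t (by omega)
        · right
          refine ⟨i + 1, ?_, ?_⟩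
          · simp only [List.length_cons]; omega
          · intro t ht
            have heq : i + 1 + t = (i + t) + 1 := by omega
            rw [heq, List.getD_cons_succ]
            exact hlow t ht
      -- cons-side (jump j) → rest-side (jump 1)
      · rintro (⟨m, hm, hlow, hkj⟩ | ⟨i, hi, hlow⟩)
        · rcases Nat.eq_zero_or_pos m with rfl | hmpos
          · omega
          · have h2 := hlow 0 hmpos
            rw [List.getD_cons_zero] at h2
            exact absurd h2 hs
        · rcases Nat.eq_zero_or_pos i with rfl | hipos
          · have h2 := hlow 0 (by omega)
            rw [Nat.zero_add, List.getD_cons_zero] at h2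
            exact absurd h2 hs
          · right
            refine ⟨i - 1, ?_, ?_⟩
            · simp only [List.length_cons] at hi; omega
            · intro t ht
              have h2 := hlow t ht
              have heq : i + t = (i - 1 + t) + 1 := by omega
              rwa [heq, List.getD_cons_succ] at h2

theorem possibleA_iff (stones : List Int) (k std : Int) (hk : 1 ≤ k) :
    possibleA stones k std = true ↔ ¬ BadRun std k.toNat stones := by
  rw [possibleA, possGo_iff std k hk stones 1 le_rfl hk]
  apply not_congr
  constructor
  · rintro (⟨m, hm, hlow, hkj⟩ | hr)
    · refine ⟨0, by omega, ?_⟩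
      intro t ht
      rw [Nat.zero_add]
      exact hlow t (by omega)
    · exact hr
  · intro hr
    exact Or.inr hr

theorem bsGo_eq (stones : List Int) (k W : Int)
    (hposs : ∀ std, possibleA stones k std = true ↔ std ≤ W) :
    ∀ (fuel : Nat) (start en : Int), start ≤ W → W ≤ en →
      (en - start).toNat + 1 ≤ fuel → bsGo stones k fuel start en = W := by
  intro fuel
  induction fuel with
  | zero => intro start en _ _ hf; omega
  | succ f ih =>
    intro start en hsW hWe hf
    have hposs' : ∀ std, possibleA stones k std = (std ≤ W : Bool) := by
      intro std
      by_cases h : std ≤ W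
      · simp [h, (hposs std).mpr h]
      · simp only [h, decide_false]
        cases hp : possibleA stones k std with
        | false => rfl
        | true => exact absurd ((hposs std).mp hp) h
    have hmid := PySem.Int.floordiv_two_mid_bounds (le_trans hsW hWe)
    simp only [bsGo, hposs']
    set mid := PySem.Int.floordiv (start + en) 2 with hmiddef
    by_cases heq : mid = W
    · simp [heq]
    · by_cases hle : mid ≤ W
      · have h1 : (mid ≤ W : Bool) = true := by simp [hle]
        have h2 : (mid + 1 ≤ W : Bool) = true := by simp; omega
        rw [h1, h2]
        simp only [Bool.not_true, Bool.and_false, Bool.false_eq_true, if_false, if_true]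
        exact ih (mid + 1) en (by omega) hWe (by omega)
      · have h1 : (mid ≤ W : Bool) = false := by simp [hle]
        rw [h1]
        simp only [Bool.false_and, Bool.false_eq_true, if_false]
        exact ih start (mid - 1) hsW (by omega) (by omega)

-- ----- B-side characterization -----

-- the maximum of the k-window starting at i
def wmaxD (stones : List Int) (kn i : Nat) : Int :=
  (PySem.List.max? ((stones.drop i).take kn) (fun x => x)).getD 0

def minsOf (stones : List Int) (kn : Nat) : List Int :=
  (List.range (stones.length - kn + 1)).map (wmaxD stones kn)

theorem win_length (stones : List Int) (kn i : Nat) (h : i + kn ≤ stones.length) :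
    ((stones.drop i).take kn).length = kn := by
  simp only [List.length_take, List.length_drop]
  omega

theorem mem_win_iff (stones : List Int) (kn i : Nat) (h : i + kn ≤ stones.length) (y : Int) :
    y ∈ (stones.drop i).take kn ↔ ∃ t, t < kn ∧ stones.getD (i + t) 0 = y := by
  rw [List.mem_iff_getElem]
  constructor
  · rintro ⟨t, ht, rfl⟩
    rw [win_length stones kn i h] at ht
    refine ⟨t, ht, ?_⟩
    rw [List.getD_eq_getElem stones 0 (by omega)]
    simp [List.getElem_take, List.getElem_drop]
  · rintro ⟨t, ht, rfl⟩
    refine ⟨t, by rw [win_length stones kn i h]; exact ht, ?_⟩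
    rw [List.getD_eq_getElem stones 0 (by omega)]
    simp [List.getElem_take, List.getElem_drop]

theorem wmaxD_spec (stones : List Int) (kn i : Nat) (hkn : 1 ≤ kn) (h : i + kn ≤ stones.length) :
    wmaxD stones kn i ∈ (stones.drop i).take kn ∧
      ∀ y ∈ (stones.drop i).take kn, y ≤ wmaxD stones kn i := by
  have hne : (stones.drop i).take kn ≠ [] := by
    intro hnil
    have := win_length stones kn i h
    rw [hnil] at this
    simp at this
    omega
  cases hmax : PySem.List.max? ((stones.drop i).take kn) (fun x => x) with
  | none => exact absurd (((PySem.List.max?_eq_none_iff _ _).mp hmax)) hne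
  | some m =>
    constructor
    · simpa [wmaxD, hmax] using PySem.List.max?_mem hmax
    · intro y hy
      simpa [wmaxD, hmax] using PySem.List.max?_isMax hmax y hy

theorem le_wmaxD_iff (stones : List Int) (kn i : Nat) (std : Int)
    (hkn : 1 ≤ kn) (h : i + kn ≤ stones.length) :
    std ≤ wmaxD stones kn i ↔ ∃ t, t < kn ∧ std ≤ stones.getD (i + t) 0 := by
  obtain ⟨hmem, hub⟩ := wmaxD_spec stones kn i hkn h
  constructor
  · intro hle
    obtain ⟨t, ht, hty⟩ := (mem_win_iff stones kn i h _).mp hmem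
    exact ⟨t, ht, by omega⟩
  · rintro ⟨t, ht, hle⟩
    have : stones.getD (i + t) 0 ∈ (stones.drop i).take kn :=
      (mem_win_iff stones kn i h _).mpr ⟨t, ht, rfl⟩
    exact le_trans hle (hub _ this)

theorem foldl_max_comm (l : List Int) : ∀ a b : Int, List.foldl max (max a b) l = max a (List.foldl max b l) := by
  induction l with
  | nil => intro a b; rfl
  | cons x t ih =>
    intro a b
    simp only [List.foldl]
    rw [max_assoc, ih]

theorem wmaxD_one (stones : List Int) (j : Nat) (hj : j < stones.length) :
    wmaxD stones 1 j = stones.getD j 0 := by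
  have hdrop : stones.drop j = stones[j] :: stones.drop (j + 1) := List.drop_eq_getElem_cons hj
  rw [wmaxD, hdrop]
  simp only [List.take_succ_cons, List.take_zero, PySem.List.max?_id_cons, List.foldl_nil,
    Option.getD_some]
  rw [List.getD_eq_getElem stones 0 hj]

theorem wmaxD_snoc (stones : List Int) (m lo : Nat) (hm : 1 ≤ m) (h : lo + m < stones.length) :
    wmaxD stones (m + 1) lo = max (wmaxD stones m lo) (stones.getD (lo + m) 0) := by
  have hgd : (stones.drop lo)[m]? = some stones[lo + m] := by
    rw [List.getElem?_drop]
    exact List.getElem?_eq_getElem (by omega)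
  have htake : (stones.drop lo).take (m + 1) = (stones.drop lo).take m ++ [stones[lo + m]] := by
    rw [List.take_add_one, hgd]
    rfl
  obtain ⟨a, t, hat⟩ : ∃ a t, (stones.drop lo).take m = a :: t := by
    cases hwin : (stones.drop lo).take m with
    | nil =>
      exfalso
      have := win_length stones m lo (by omega)
      rw [hwin] at this
      simp at this
      omega
    | cons a t => exact ⟨a, t, rfl⟩
  rw [wmaxD, wmaxD, htake, hat]
  simp only [List.cons_append, PySem.List.max?_id_cons, Option.getD_some, List.foldl_append,
    List.foldl]
  rw [List.getD_eq_getElem stones 0 (by omega)]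

theorem wmaxD_cons (stones : List Int) (m lo : Nat) (hm : 1 ≤ m) (h : lo + m < stones.length) :
    wmaxD stones (m + 1) lo = max (stones.getD lo 0) (wmaxD stones m (lo + 1)) := by
  have hdrop : stones.drop lo = stones[lo] :: stones.drop (lo + 1) := List.drop_eq_getElem_cons (by omega)
  obtain ⟨a, t, hat⟩ : ∃ a t, (stones.drop (lo + 1)).take m = a :: t := by
    cases hwin : (stones.drop (lo + 1)).take m with
    | nil =>
      exfalso
      have := win_length stones m (lo + 1) (by omega)
      rw [hwin] at this
      simp at this
      omega
    | cons a t => exact ⟨a, t, rfl⟩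
  rw [wmaxD, wmaxD, hdrop]
  simp only [List.take_succ_cons, hat, PySem.List.max?_id_cons, Option.getD_some, List.foldl]
  rw [List.getD_eq_getElem stones 0 (by omega), foldl_max_comm]

theorem succ_mod (i kn : Nat) (hkn : 1 ≤ kn) :
    (i + 1) % kn = if i % kn + 1 = kn then 0 else i % kn + 1 := by
  have hdm := Nat.div_add_mod i kn
  have hlt := Nat.mod_lt i (show 0 < kn by omega)
  rcases Nat.lt_or_ge (i % kn + 1) kn with hl | hg
  · rw [if_neg (by omega)]
    have : i + 1 = kn * (i / kn) + (i % kn + 1) := by omega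
    rw [this, Nat.mul_add_mod, Nat.mod_eq_of_lt hl]
  · rw [if_pos (by omega)]
    have : i + 1 = kn * (i / kn + 1) := by
      rw [Nat.mul_add, Nat.mul_one]
      omega
    rw [this, Nat.mul_mod_right]

-- the element pushed by goPre at index i is the running block maximum through i
theorem goPre_head (stones : List Int) (k : Int) (hk1 : 1 ≤ k) (i : Nat) (prev : Int)
    (hprev : i % k.toNat ≠ 0 → prev = wmaxD stones (i % k.toNat) (i - i % k.toNat))
    (hi : i < stones.length) :
    (if PySem.Int.mod (i : Int) k = 0 then stones[i] else max prev stones[i]) =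
      wmaxD stones (i % k.toNat + 1) (i - i % k.toNat) := by
  have hkcast : k = ((k.toNat : Nat) : Int) := by omega
  have hmod : PySem.Int.mod (i : Int) k = ((i % k.toNat : Nat) : Int) := by
    rw [hkcast, PySem.Int.mod_natCast]
    simp
  have hrle : i % k.toNat ≤ i := Nat.mod_le i k.toNat
  by_cases hr : i % k.toNat = 0
  · rw [if_pos (by rw [hmod, hr]; rfl), hr]
    rw [Nat.sub_zero, wmaxD_one stones i hi, List.getD_eq_getElem stones 0 hi]
  · rw [if_neg (by rw [hmod]; intro hc; exact hr (by exact_mod_cast hc))]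
    rw [hprev hr, wmaxD_snoc stones (i % k.toNat) (i - i % k.toNat) (by omega) (by omega)]
    rw [show i - i % k.toNat + i % k.toNat = i by omega]
    rw [List.getD_eq_getElem stones 0 hi]

theorem goPre_spec (stones : List Int) (k : Int) (hk1 : 1 ≤ k) :
    ∀ (t i : Nat) (prev : Int),
      (i % k.toNat ≠ 0 → prev = wmaxD stones (i % k.toNat) (i - i % k.toNat)) →
      i + t < stones.length →
      (goPre k (stones.drop i) i prev).getD t 0 =
        wmaxD stones ((i + t) % k.toNat + 1) ((i + t) - (i + t) % k.toNat) := by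
  intro t
  induction t with
  | zero =>
    intro i prev hprev hlt
    have hdrop : stones.drop i = stones[i] :: stones.drop (i + 1) :=
      List.drop_eq_getElem_cons (by omega)
    rw [hdrop]
    simp only [goPre, List.getD_cons_zero, Nat.add_zero]
    exact goPre_head stones k hk1 i prev hprev (by omega)
  | succ t ih =>
    intro i prev hprev hlt
    have hdrop : stones.drop i = stones[i] :: stones.drop (i + 1) :=
      List.drop_eq_getElem_cons (by omega)
    rw [hdrop]
    simp only [goPre, List.getD_cons_succ]
    have hv := goPre_head stones k hk1 i prev hprev (by omega)
    rw [hv]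
    have hres := ih (i + 1) (wmaxD stones (i % k.toNat + 1) (i - i % k.toNat)) ?_ (by omega)
    · rw [show i + 1 + t = i + (t + 1) from by omega] at hres
      exact hres
    · intro hne
      have hs := succ_mod i k.toNat (by omega)
      by_cases hc : i % k.toNat + 1 = k.toNat
      · rw [hs, if_pos hc] at hne
        omega
      · rw [hs, if_neg hc]
        congr 1
        omega

-- suffix block maximum: max of stones[i .. min(block end of i, n-1)]
def smaxD (stones : List Int) (kn i : Nat) : Int :=
  wmaxD stones (min (i - i % kn + kn - 1) (stones.length - 1) + 1 - i) i

theorem goSuf_head (stones : List Int) (k : Int) (hk1 : 1 ≤ k) (i : Nat)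
    (hi : i < stones.length) (tailval : Int)
    (htail : i + 1 < stones.length → tailval = smaxD stones k.toNat (i + 1)) :
    (if PySem.Int.mod (i : Int) k = k - 1 ∨ i = stones.length - 1 then stones[i]
      else max tailval stones[i]) = smaxD stones k.toNat i := by
  have hkcast : k = ((k.toNat : Nat) : Int) := by omega
  have hmod : PySem.Int.mod (i : Int) k = ((i % k.toNat : Nat) : Int) := by
    rw [hkcast, PySem.Int.mod_natCast]
    simp
  have hrlt : i % k.toNat < k.toNat := Nat.mod_lt i (by omega)
  have hrle : i % k.toNat ≤ i := Nat.mod_le i k.toNat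
  have hcond : (PySem.Int.mod (i : Int) k = k - 1 ∨ i = stones.length - 1) ↔
      (i % k.toNat = k.toNat - 1 ∨ i = stones.length - 1) := by
    rw [hmod]
    constructor
    · rintro (h | h)
      · left; omega
      · right; exact h
    · rintro (h | h)
      · left; omega
      · right; exact h
  by_cases hc : i % k.toNat = k.toNat - 1 ∨ i = stones.length - 1
  · rw [if_pos (hcond.mpr hc)]
    have he : min (i - i % k.toNat + k.toNat - 1) (stones.length - 1) = i := by
      rcases hc with h | h <;> omega
    rw [smaxD, he, show i + 1 - i = 1 from by omega, wmaxD_one stones i hi,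
      List.getD_eq_getElem stones 0 hi]
  · rw [if_neg (fun h => hc (hcond.mp h))]
    push Not at hc
    obtain ⟨hr, hn⟩ := hc
    have hi1 : i + 1 < stones.length := by omega
    have hs1 : (i + 1) % k.toNat = i % k.toNat + 1 := by
      rw [succ_mod i k.toNat (by omega), if_neg (by omega)]
    have he' : min ((i + 1) - (i + 1) % k.toNat + k.toNat - 1) (stones.length - 1) =
        min (i - i % k.toNat + k.toNat - 1) (stones.length - 1) := by
      rw [hs1]
      congr 1
      omega
    set e := min (i - i % k.toNat + k.toNat - 1) (stones.length - 1) with hedef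
    have hei : i + 1 ≤ e := by omega
    have hen : e < stones.length := by omega
    have hsplit : smaxD stones k.toNat i = max (stones.getD i 0) (wmaxD stones (e - i) (i + 1)) := by
      rw [smaxD, ← hedef, show e + 1 - i = (e - i) + 1 from by omega]
      exact wmaxD_cons stones (e - i) i (by omega) (by omega)
    rw [hsplit, htail hi1, smaxD, he',
      show e + 1 - (i + 1) = e - i from by omega, List.getD_eq_getElem stones 0 hi, max_comm]

theorem goSuf_spec (stones : List Int) (k : Int) (hk1 : 1 ≤ k) :
    ∀ (l : List Int) (i : Nat), l = stones.drop i →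
      ∀ t, i + t < stones.length →
        (goSuf k stones.length l i).getD t 0 = smaxD stones k.toNat (i + t) := by
  intro l
  induction l with
  | nil =>
    intro i hl t ht
    exfalso
    have := congrArg List.length hl
    simp only [List.length_nil, List.length_drop] at this
    omega
  | cons s rest ih =>
    intro i hl t ht
    have hi : i < stones.length := by
      have := congrArg List.length hl
      simp only [List.length_cons, List.length_drop] at this
      omega
    have hdrop : stones.drop i = stones[i] :: stones.drop (i + 1) :=
      List.drop_eq_getElem_cons hi
    rw [hdrop] at hl
    injection hl with hsv hrest
    subst hsv
    have htailval : i + 1 < stones.length →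
        (goSuf k stones.length rest (i + 1)).headD 0 = smaxD stones k.toNat (i + 1) := by
      intro h1
      have hh : (goSuf k stones.length rest (i + 1)).headD 0 =
          (goSuf k stones.length rest (i + 1)).getD 0 0 := by
        cases goSuf k stones.length rest (i + 1) <;> rfl
      rw [hh]
      have := ih (i + 1) hrest 0 (by omega)
      simpa using this
    cases t with
    | zero =>
      simp only [goSuf, List.getD_cons_zero, Nat.add_zero]
      exact goSuf_head stones k hk1 i hi _ htailval
    | succ t =>
      simp only [goSuf, List.getD_cons_succ]
      have := ih (i + 1) hrest t (by omega)
      rw [show i + (t + 1) = i + 1 + t from by omega]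
      exact this

-- a window contained in the k-window at i has a smaller maximum
theorem wmaxD_le (stones : List Int) (m' lo' kn i : Nat) (hm' : 1 ≤ m') (hkn : 1 ≤ kn)
    (h1 : i ≤ lo') (h2 : lo' + m' ≤ i + kn) (h : i + kn ≤ stones.length) :
    wmaxD stones m' lo' ≤ wmaxD stones kn i := by
  obtain ⟨hmem, _⟩ := wmaxD_spec stones m' lo' hm' (by omega)
  obtain ⟨t, ht, heq⟩ := (mem_win_iff stones m' lo' (by omega) _).mp hmem
  obtain ⟨_, hub⟩ := wmaxD_spec stones kn i hkn h
  have hin : stones.getD (lo' + t) 0 ∈ (stones.drop i).take kn :=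
    (mem_win_iff stones kn i h _).mpr
      ⟨lo' + t - i, by omega, by rw [show i + (lo' + t - i) = lo' + t from by omega]⟩
  rw [← heq]
  exact hub _ hin

-- the k-window maximum is the max of the block-suffix max at i and the
-- block-prefix max at i+k-1
theorem combine_max (stones : List Int) (kn i : Nat) (hkn : 1 ≤ kn)
    (h : i + kn ≤ stones.length) :
    max (smaxD stones kn i)
        (wmaxD stones ((i + kn - 1) % kn + 1) ((i + kn - 1) - (i + kn - 1) % kn)) =
      wmaxD stones kn i := by
  have hrlt : i % kn < kn := Nat.mod_lt i (by omega)
  have hrle : i % kn ≤ i := Nat.mod_le i kn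
  have hdm := Nat.div_add_mod i kn
  have hjmod : (i % kn = 0 ∧ (i + kn - 1) % kn = kn - 1) ∨
      (1 ≤ i % kn ∧ (i + kn - 1) % kn = i % kn - 1) := by
    by_cases hr0 : i % kn = 0
    · left
      refine ⟨hr0, ?_⟩
      rw [show i + kn - 1 = kn * (i / kn) + (kn - 1) from by omega, Nat.mul_add_mod,
        Nat.mod_eq_of_lt (by omega)]
    · right
      refine ⟨by omega, ?_⟩
      rw [show i + kn - 1 = kn * (i / kn + 1) + (i % kn - 1) from by
          rw [Nat.mul_add, Nat.mul_one]; omega,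
        Nat.mul_add_mod, Nat.mod_eq_of_lt (by omega)]
  have hsm : smaxD stones kn i = wmaxD stones (i - i % kn + kn - 1 + 1 - i) i := by
    rw [smaxD, Nat.min_eq_left (by omega)]
  apply le_antisymm
  · apply max_le
    · rw [hsm]
      exact wmaxD_le stones _ i kn i (by omega) hkn le_rfl (by omega) h
    · exact wmaxD_le stones _ _ kn i (by omega) hkn (by omega) (by omega) h
  · obtain ⟨hmem, _⟩ := wmaxD_spec stones kn i hkn h
    obtain ⟨t, ht, heq⟩ := (mem_win_iff stones kn i h _).mp hmem
    rw [← heq]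
    by_cases hcase : i + t ≤ i - i % kn + kn - 1
    · apply le_max_of_le_left
      rw [hsm]
      obtain ⟨_, hub⟩ := wmaxD_spec stones (i - i % kn + kn - 1 + 1 - i) i (by omega) (by omega)
      exact hub _ ((mem_win_iff stones _ i (by omega) _).mpr ⟨t, by omega, rfl⟩)
    · apply le_max_of_le_right
      obtain ⟨_, hub⟩ :=
        wmaxD_spec stones ((i + kn - 1) % kn + 1) ((i + kn - 1) - (i + kn - 1) % kn)
          (by omega) (by omega)
      refine hub _ ((mem_win_iff stones _ _ (by omega) _).mpr
        ⟨i + t - ((i + kn - 1) - (i + kn - 1) % kn), by omega, ?_⟩)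
      rw [show (i + kn - 1) - (i + kn - 1) % kn +
            (i + t - ((i + kn - 1) - (i + kn - 1) % kn)) = i + t from by omega]

theorem solution_alt_eq (stones : List Int) (k : Int) (hk1 : 1 ≤ k) (hkn : k ≤ stones.length) :
    solution_alt stones k =
      (PySem.List.min? (minsOf stones k.toNat) (fun x => x)).getD 0 := by
  have hcast : (stones.length : Int) - k + 1 = ((stones.length - k.toNat + 1 : Nat) : Int) := by
    omega
  simp only [solution_alt, minsOf]
  rw [hcast, PySem.List.pyRange_zero_natCast, List.map_map]
  congr 2
  apply List.map_congr_left
  intro t hmem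
  rw [List.mem_range] at hmem
  have hk1x : 1 ≤ k.toNat := by omega
  have ht : t + k.toNat ≤ stones.length := by omega
  simp only [Function.comp]
  have hsuf : (PySem.List.pyGet? (goSuf k stones.length stones 0) ((t : Nat) : Int)).getD 0 =
      smaxD stones k.toNat t := by
    rw [PySem.List.pyGet?_natCast, ← List.getD_eq_getElem?_getD]
    have := goSuf_spec stones k hk1 stones 0 (by rw [List.drop_zero]) t (by omega)
    simpa using this
  have hprei : (((t : Nat) : Int) + k - 1) = ((t + k.toNat - 1 : Nat) : Int) := by omega
  have hpre : (PySem.List.pyGet? (goPre k stones 0 0) (((t : Nat) : Int) + k - 1)).getD 0 =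
      wmaxD stones ((t + k.toNat - 1) % k.toNat + 1)
        ((t + k.toNat - 1) - (t + k.toNat - 1) % k.toNat) := by
    rw [hprei, PySem.List.pyGet?_natCast, ← List.getD_eq_getElem?_getD]
    have := goPre_spec stones k hk1 (t + k.toNat - 1) 0 0 (by intro h; simp at h) (by omega)
    rw [List.drop_zero] at this
    simpa using this
  rw [hsuf, hpre]
  exact combine_max stones k.toNat t hk1x ht

theorem minsOf_ne_nil (stones : List Int) (kn : Nat) : minsOf stones kn ≠ [] := by
  simp [minsOf, List.range_succ]

theorem mem_minsOf (stones : List Int) (kn : Nat) (_hkn1 : 1 ≤ kn) (hkn2 : kn ≤ stones.length)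
    (x : Int) : x ∈ minsOf stones kn ↔ ∃ i, i + kn ≤ stones.length ∧ wmaxD stones kn i = x := by
  simp only [minsOf, List.mem_map, List.mem_range]
  constructor
  · rintro ⟨i, hi, rfl⟩
    exact ⟨i, by omega, rfl⟩
  · rintro ⟨i, hi, rfl⟩
    exact ⟨i, by omega, rfl⟩

theorem possible_iff_le (stones : List Int) (k : Int) (hk1 : 1 ≤ k) (hkn : k ≤ stones.length)
    (std : Int) :
    possibleA stones k std = true ↔
      std ≤ (PySem.List.min? (minsOf stones k.toNat) (fun x => x)).getD 0 := by
  cases hmin : PySem.List.min? (minsOf stones k.toNat) (fun x => x) with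
  | none => exact absurd (((PySem.List.min?_eq_none_iff _ _).mp hmin)) (minsOf_ne_nil stones k.toNat)
  | some w =>
    have hk1x : 1 ≤ k.toNat := by omega
    have hkn' : k.toNat ≤ stones.length := by omega
    have hwmem : w ∈ minsOf stones k.toNat := PySem.List.min?_mem hmin
    have hwlb : ∀ y ∈ minsOf stones k.toNat, w ≤ y := by
      intro y hy
      simpa using PySem.List.min?_isMin hmin y hy
    rw [possibleA_iff stones k std hk1]
    simp only [Option.getD_some]
    constructor
    · intro hnb
      obtain ⟨i, hi, rfl⟩ := (mem_minsOf stones k.toNat hk1x hkn' w).mp hwmem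
      rw [le_wmaxD_iff stones k.toNat i std hk1x hi]
      by_contra hno
      push Not at hno
      exact hnb ⟨i, hi, fun t ht => by have := hno t ht; omega⟩
    · rintro hle ⟨i, hi, hlow⟩
      have hwx : w ≤ wmaxD stones k.toNat i :=
        hwlb _ ((mem_minsOf stones k.toNat hk1x hkn' _).mpr ⟨i, hi, rfl⟩)
      have := (le_wmaxD_iff stones k.toNat i std hk1x hi).mp (le_trans hle hwx)
      obtain ⟨t, ht, hstd⟩ := this
      have := hlow t ht
      omega

-- ===== VERDICT (by name: the statement is the Claim_ definition above) =====
theorem solution_spec : Claim_equal_solution := by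
  unfold Claim_equal_solution
  intro stones k _hdom hpre
  obtain ⟨hk1, hkn, hwin⟩ := hpre
  unfold Spec_solution
  rw [solution_alt_eq stones k hk1 hkn]
  have hk1x : 1 ≤ k.toNat := by omega
  have hknx : k.toNat ≤ stones.length := by omega
  set W := (PySem.List.min? (minsOf stones k.toNat) fun x => x).getD 0 with hW
  have hWmem : W ∈ minsOf stones k.toNat := by
    cases hmin : PySem.List.min? (minsOf stones k.toNat) (fun x => x) with
    | none => exact absurd ((PySem.List.min?_eq_none_iff _ _).mp hmin) (minsOf_ne_nil _ _)
    | some w =>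
      rw [hW, hmin]
      simpa using PySem.List.min?_mem hmin
  obtain ⟨i0, hi0, hWi0⟩ := (mem_minsOf stones k.toNat hk1x hknx W).mp hWmem
  by_cases hlen : stones.length = 1
  · obtain ⟨a, rfl⟩ := List.length_eq_one_iff.mp hlen
    have hsol : solution [a] k = a := by
      simp [solution, PySem.List.pyGet?, PySem.List.pyIdx?]
    rw [hsol]
    have hk1' : k.toNat = 1 := by
      simp only [List.length_cons, List.length_nil] at hkn
      omega
    have hmins : minsOf [a] k.toNat = [a] := by
      simp [minsOf, hk1', wmaxD, PySem.List.max?_id_cons, List.range_one]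
    rw [hW, hmins, PySem.List.min?_id_cons]
    simp
  · have hwin' : ∀ i < stones.length + 1 - k.toNat, ∃ j < k.toNat, 0 ≤ stones.getD (i + j) 0 :=
      hwin.resolve_left hlen
    have hposs : ∀ std, possibleA stones k std = true ↔ std ≤ W := fun std =>
      possible_iff_le stones k hk1 hkn std
    have hW0 : 0 ≤ W := by
      rw [← hWi0, le_wmaxD_iff stones k.toNat i0 0 hk1x hi0]
      obtain ⟨j, hj, hge⟩ := hwin' i0 (by omega)
      exact ⟨j, hj, hge⟩
    have hne : stones ≠ [] := by
      intro h
      rw [h] at hknx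
      simp at hknx
      omega
    cases hmax : PySem.List.max? stones (fun x => x) with
    | none => exact absurd ((PySem.List.max?_eq_none_iff _ _).mp hmax) hne
    | some mx =>
      have hWmx : W ≤ mx := by
        rw [← hWi0]
        obtain ⟨hmem, _⟩ := wmaxD_spec stones k.toNat i0 hk1x hi0
        have hmem' : wmaxD stones k.toNat i0 ∈ stones :=
          List.mem_of_mem_drop (List.mem_of_mem_take hmem)
        simpa using PySem.List.max?_isMax hmax _ hmem'
      have hfinal : solution stones k = bsGo stones k (mx.toNat + 2) 0 mx := by
        simp only [solution, if_neg hlen, hmax, Option.getD_some]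
      rw [hfinal]
      exact bsGo_eq stones k W hposs (mx.toNat + 2) 0 mx hW0 hWmx (by omega)
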